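-- pv_equiv track=rewrite | github.com/SebastianAlmer/DATEV-pdf-to-csv | pdf-to-csv_DATEV_Entwicklungsuebersicht.py | compress_blank_rows
-- ===== SOURCE A (Python) =====
-- def compress_blank_rows(rows):
--     cleaned = []
--     prev_blank = False
--     for label, values in rows:
--         is_blank = not label and (not values or all(v == "" for v in values))
--         if is_blank and prev_blank:
--             continue
--         cleaned.append((label, values))
--         prev_blank = is_blank
--     return cleaned
-- ===== SOURCE B (Python) =====
-- def compress_blank_rows(rows):
--     rows = list(rows)
--
--     def blank(row):
--         label, values = row
--         return not label and (not values or all(v == "" for v in values))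
--
--     out = []
--     i = 0
--     n = len(rows)
--     while i < n:
--         k = blank(rows[i])
--         j = i + 1
--         while j < n and blank(rows[j]) == k:
--             j += 1
--         if k:
--             label, values = rows[i]
--             out.append((label, values))
--         else:
--             for label, values in rows[i:j]:
--                 out.append((label, values))
--         i = j
--     return out
-- ===== Notes on version B (the rewrite author's own statement) =====
-- stated objective: alternative
-- what changed: Replaces the stateful prev_blank scan with run-grouping: an outer index loop splits rows into maximal runs of equal blankness, emits only the first row of a blank run and every row of a non-blank run.
import Mathlib
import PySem

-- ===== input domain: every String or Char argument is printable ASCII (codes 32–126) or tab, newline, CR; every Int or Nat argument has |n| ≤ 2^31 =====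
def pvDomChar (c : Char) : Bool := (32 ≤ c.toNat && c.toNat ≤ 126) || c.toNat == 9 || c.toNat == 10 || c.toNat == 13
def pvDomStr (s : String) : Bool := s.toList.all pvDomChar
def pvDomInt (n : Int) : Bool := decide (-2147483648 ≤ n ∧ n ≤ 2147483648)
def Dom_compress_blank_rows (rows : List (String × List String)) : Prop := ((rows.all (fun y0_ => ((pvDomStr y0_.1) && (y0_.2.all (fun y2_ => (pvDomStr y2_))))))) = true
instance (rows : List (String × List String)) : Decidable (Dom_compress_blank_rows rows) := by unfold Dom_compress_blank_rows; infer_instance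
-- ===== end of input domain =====

-- B replaces A's stateful prev_blank scan by run-grouping (split rows into maximal
-- runs of equal blankness; keep one row of a blank run, all of a non-blank run);
-- return values proved equal on all inputs.

-- ===== PORT A =====
-- A: one pass with accumulator (cleaned, prev_blank)
def compress_blank_rows (rows : List (String × List String)) : List (String × List String) :=
  (rows.foldl
    (fun (st : List (String × List String) × Bool) r =>
      let is_blank := r.1 == "" && (r.2.isEmpty || r.2.all (fun v => v == ""))
      if is_blank && st.2 then st
      else (st.1 ++ [r], is_blank))
    ([], false)).1

-- ===== PORT B =====
-- helper `blank` of Source B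
def pvBlankRow (r : String × List String) : Bool :=
  r.1 == "" && (r.2.isEmpty || r.2.all (fun v => v == ""))

-- B: the outer while splits off the maximal run of rows sharing the head's
-- blankness (the inner `while j < n and blank(rows[j]) == k` = takeWhile/dropWhile
-- on the remainder), emits [rows[i]] for a blank run and the whole slice rows[i:j]
-- for a non-blank run, then continues at j.
def compress_blank_rows_alt (rows : List (String × List String)) : List (String × List String) :=
  match rows with
  | [] => []
  | r :: t =>
    let k := pvBlankRow r
    (if k then [r] else r :: t.takeWhile (fun x => pvBlankRow x == k)) ++
      compress_blank_rows_alt (t.dropWhile (fun x => pvBlankRow x == k))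
termination_by rows.length
decreasing_by
  simp only [List.length_cons]
  exact Nat.lt_succ_of_le (List.length_dropWhile_le _ _)

-- ===== PRECONDITION & SPEC =====
def Spec_compress_blank_rows (rows : List (String × List String)) (out : List (String × List String)) : Prop := out = compress_blank_rows_alt rows
instance (rows : List (String × List String)) (out : List (String × List String)) : Decidable (Spec_compress_blank_rows rows out) := by unfold Spec_compress_blank_rows; infer_instance

-- ===== CLAIM (what is proved, stated in full; the proofs are below) =====
def Claim_equal_compress_blank_rows : Prop := ∀ (rows : List (String × List String)), Dom_compress_blank_rows rows → Spec_compress_blank_rows rows (compress_blank_rows rows)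

-- ===== LEMMAS AND PROOFS =====

-- canonical form both sides are reduced to: pvG b l, where b = "previous kept-state row was blank"
def pvG (b : Bool) : List (String × List String) → List (String × List String)
  | [] => []
  | r :: t => (if pvBlankRow r && b then [] else [r]) ++ pvG (pvBlankRow r) t

lemma foldl_eq_g (l : List (String × List String))
    (acc : List (String × List String)) (b : Bool) :
    (l.foldl
      (fun (st : List (String × List String) × Bool) r =>
        let is_blank := r.1 == "" && (r.2.isEmpty || r.2.all (fun v => v == ""))
        if is_blank && st.2 then st
        else (st.1 ++ [r], is_blank))
      (acc, b)).1 = acc ++ pvG b l := by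
  induction l generalizing acc b with
  | nil => simp [pvG]
  | cons r t ih =>
    rw [List.foldl_cons]
    show (List.foldl _
      (if pvBlankRow r && b then (acc, b) else (acc ++ [r], pvBlankRow r)) t).1 = _
    by_cases h : (pvBlankRow r && b) = true
    · rw [Bool.and_eq_true] at h
      obtain ⟨h1, h2⟩ := h
      rw [if_pos (by rw [h1, h2]; rfl), ih, pvG, h1, h2]
      simp
    · rw [if_neg h, ih, pvG, if_neg h]
      simp

-- pvG ignores the incoming flag when the list is empty or starts non-blank
lemma g_flag_irrel (l : List (String × List String)) (b b' : Bool)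
    (h : ∀ r t, l = r :: t → pvBlankRow r = false) : pvG b l = pvG b' l := by
  cases l with
  | nil => rfl
  | cons r t => simp [pvG, h r t rfl]

-- a run of blank rows collapses to its head (or nothing if preceded by blank)
lemma g_blank_run (rs : List (String × List String)) (rest : List (String × List String)) (b : Bool)
    (h : ∀ x ∈ rs, pvBlankRow x = true) :
    pvG b (rs ++ rest) = (if b then [] else rs.take 1) ++
      pvG (if rs = [] then b else true) rest := by
  induction rs generalizing b with
  | nil => simp
  | cons r rs' ih =>
    rw [List.cons_append, pvG, h r (by simp),
      ih true (fun x hx => h x (List.mem_cons_of_mem _ hx))]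
    cases b <;> cases rs' <;> simp

-- a run of non-blank rows is kept wholesale
lemma g_nonblank_run (rs : List (String × List String)) (rest : List (String × List String)) (b : Bool)
    (h : ∀ x ∈ rs, pvBlankRow x = false) :
    pvG b (rs ++ rest) = rs ++ pvG (if rs = [] then b else false) rest := by
  induction rs generalizing b with
  | nil => simp
  | cons r rs' ih =>
    have hr : pvBlankRow r = false := h r (by simp)
    simp only [List.cons_append, pvG, hr]
    rw [ih false (fun x hx => h x (by simp [hx]))]
    cases rs' <;> simp

lemma alt_eq_g (rows : List (String × List String)) :
    compress_blank_rows_alt rows = pvG false rows := by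
  induction hn : rows.length using Nat.strong_induction_on generalizing rows with
  | _ n ih =>
  cases rows with
  | nil => simp [compress_blank_rows_alt, pvG]
  | cons r t =>
    subst hn
    set k := pvBlankRow r with hk
    set run := t.takeWhile (fun x => pvBlankRow x == k) with hrun
    set rest := t.dropWhile (fun x => pvBlankRow x == k) with hrest
    have hsplit : t = run ++ rest := (List.takeWhile_append_dropWhile).symm
    have hrunmem : ∀ x ∈ run, pvBlankRow x = k := by
      intro x hx
      have := List.mem_takeWhile_imp (hrun ▸ hx)
      simpa using this
    have hresthead : ∀ a l, rest = a :: l → pvBlankRow a ≠ k := by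
      intro a l hal
      have := List.head?_dropWhile_not (fun x => pvBlankRow x == k) t
      rw [← hrest, hal] at this
      simpa using this
    have hrest_lt : rest.length < (r :: t).length := by
      simp only [List.length_cons]
      exact Nat.lt_succ_of_le (List.length_dropWhile_le _ _)
    have ihrest := ih rest.length hrest_lt rest rfl
    rw [compress_blank_rows_alt]
    simp only [← hk, ← hrun, ← hrest]
    rw [ihrest]
    cases hkv : k with
    | true =>
      -- head is blank: A keeps [r] (prev flag false) and drops the rest of the run
      have : pvG false (r :: t) = [r] ++ pvG true rest := by
        rw [hsplit]
        show pvG false (r :: (run ++ rest)) = _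
        rw [show r :: (run ++ rest) = (r :: run) ++ rest by simp]
        rw [g_blank_run (r :: run) rest false
          (by intro x hx; rcases List.mem_cons.1 hx with h | h
              · subst h; rw [← hk, hkv]
              · rw [hrunmem x h, hkv])]
        simp
      rw [this]
      have hreq : pvG true rest = pvG false rest := by
        apply g_flag_irrel
        intro a l hal
        simpa [hkv] using hresthead a l hal
      simp [hreq]
    | false =>
      -- head is non-blank: the whole run is kept
      have : pvG false (r :: t) = (r :: run) ++ pvG false rest := by
        rw [hsplit]
        show pvG false (r :: (run ++ rest)) = _
        rw [show r :: (run ++ rest) = (r :: run) ++ rest by simp]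
        rw [g_nonblank_run (r :: run) rest false
          (by intro x hx; rcases List.mem_cons.1 hx with h | h
              · subst h; rw [← hk, hkv]
              · rw [hrunmem x h, hkv])]
        simp
      rw [this]
      simp

-- ===== VERDICT (by name: the statement is the Claim_ definition above) =====
theorem compress_blank_rows_spec : Claim_equal_compress_blank_rows := by
  intro rows _
  unfold Spec_compress_blank_rows compress_blank_rows
  rw [foldl_eq_g, alt_eq_g]
  simp
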